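-- pv_equiv track=rewrite | github.com/jruiz002/Lab2_TC | Problema 3/shunting_yard.py | format_regex
-- ===== SOURCE A (Python) =====
-- def format_regex(regex):
--     """
--     Format regex by adding explicit concatenation operators ('.').
--     Properly handles character classes, escaped characters, and multi-character tokens.
--     """
--     all_operators = ['|', '?', '+', '*', '∗', '^']
--     binary_operators = ['^', '|']
--     result = []
--
--     cleaned_regex = regex.replace(' ', '')
--
--     i = 0
--     while i < len(cleaned_regex):
--         char = cleaned_regex[i]
--
--         # Handle escaped characters
--         if char == '\\' and i + 1 < len(cleaned_regex):
--             next_char = cleaned_regex[i + 1]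
--             if next_char in ['n', 't', 'r', 's', 'd', 'w']:
--                 token = char + next_char
--                 result.append(token)
--                 i += 2
--             elif next_char in ['(', ')', '{', '}', '[', ']', '+', '*', '?', '|', '^', '.']:
--                 result.append(next_char)
--                 i += 2
--             else:
--                 token = char + next_char
--                 result.append(token)
--                 i += 2
--         elif char == '[':
--             j = i + 1
--             while j < len(cleaned_regex) and cleaned_regex[j] != ']':
--                 j += 1
--             if j < len(cleaned_regex):
--                 token = cleaned_regex[i:j+1]
--                 result.append(token)
--                 i = j + 1
--             else:
--                 result.append(char)
--                 i += 1
--         elif char == '{':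
--             j = i + 1
--             while j < len(cleaned_regex) and cleaned_regex[j] != '}':
--                 j += 1
--             if j < len(cleaned_regex):
--                 token = cleaned_regex[i:j+1]
--                 result.append(token)
--                 i = j + 1
--             else:
--                 result.append(char)
--                 i += 1
--         else:
--             result.append(char)
--             i += 1
--
--     final_result = []
--     for i in range(len(result)):
--         token = result[i]
--         final_result.append(token)
--
--         # Check if we need to add concatenation operator
--         if i + 1 < len(result):
--             next_token = result[i + 1]
--
--             if (token != '(' and
--                 token not in binary_operators and
--                 next_token != ')' and
--                 next_token not in all_operators):
--                 final_result.append('.')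
--
--     return ''.join(final_result)
-- ===== SOURCE B (Python) =====
-- def format_regex(regex):
--     """Single-pass: insert '.' while tokenizing, tracking only the previous token."""
--     all_operators = ('|', '?', '+', '*', '\u2217', '^')
--     binary_operators = ('^', '|')
--     s = regex.replace(' ', '')
--     out = []
--     prev = None
--     i = 0
--     while i < len(s):
--         c = s[i]
--         if c == '\\' and i + 1 < len(s):
--             nc = s[i + 1]
--             if nc in ('(', ')', '{', '}', '[', ']', '+', '*', '?', '|', '^', '.'):
--                 tok = nc
--             else:
--                 tok = c + nc
--             i += 2
--         elif c in ('[', '{'):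
--             close = ']' if c == '[' else '}'
--             j = i + 1
--             while j < len(s) and s[j] != close:
--                 j += 1
--             if j < len(s):
--                 tok = s[i:j + 1]
--                 i = j + 1
--             else:
--                 tok = c
--                 i += 1
--         else:
--             tok = c
--             i += 1
--         if (prev is not None and prev != '(' and prev not in binary_operators
--                 and tok != ')' and tok not in all_operators):
--             out.append('.')
--         out.append(tok)
--         prev = tok
--     return ''.join(out)
-- ===== Notes on version B (the rewrite author's own statement) =====
-- stated objective: simpler
-- what changed: A tokenizes into an intermediate list and then runs a second indexed pass peeking at the next token to insert the concatenation operator; B does a single fused pass that decides the concatenation operator against only the previously emitted token, so the token list and the second scan disappear.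
import Mathlib
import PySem

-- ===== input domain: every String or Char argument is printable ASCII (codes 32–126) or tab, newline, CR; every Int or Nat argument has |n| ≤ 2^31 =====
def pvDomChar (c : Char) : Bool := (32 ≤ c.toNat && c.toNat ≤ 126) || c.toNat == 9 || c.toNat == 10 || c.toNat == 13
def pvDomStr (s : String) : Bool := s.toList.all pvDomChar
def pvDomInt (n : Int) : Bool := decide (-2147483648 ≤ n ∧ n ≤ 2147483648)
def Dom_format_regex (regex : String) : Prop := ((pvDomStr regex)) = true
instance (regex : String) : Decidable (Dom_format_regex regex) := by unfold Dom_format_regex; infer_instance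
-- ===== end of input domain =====

-- B fuses A's two passes (tokenize to a list, then a second indexed scan inserting the concatenation operator)
-- into one pass that keeps only the previous token; same return value.

-- shared token-class constants (both Pythons define the same literal lists)
def pvEscChars : List Char := ['n', 't', 'r', 's', 'd', 'w']
def pvPunctChars : List Char := ['(', ')', '{', '}', '[', ']', '+', '*', '?', '|', '^', '.']
def pvAllOps : List (List Char) := [['|'], ['?'], ['+'], ['*'], ['∗'], ['^']]
def pvBinOps : List (List Char) := [['^'], ['|']]

-- the inner j-while loop both Pythons contain verbatim: scan forward for `close`;
-- some (body, rest-after-close) if found, none if the loop runs off the end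
def pvScanTo (close : Char) : List Char → Option (List Char × List Char)
  | [] => none
  | c :: cs =>
    if c = close then some ([], cs)
    else
      match pvScanTo close cs with
      | none => none
      | some (b, r) => some (c :: b, r)

theorem pvScanTo_length (close : Char) (cs b r : List Char)
    (h : pvScanTo close cs = some (b, r)) : r.length < cs.length := by
  induction cs generalizing b r with
  | nil => simp [pvScanTo] at h
  | cons c cs ih =>
    simp only [pvScanTo] at h
    split at h
    · simp_all
    · cases hrec : pvScanTo close cs with
      | none => rw [hrec] at h; simp at h
      | some p =>
        rw [hrec] at h
        obtain ⟨b', r'⟩ := p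
        simp only [Option.some.injEq, Prod.mk.injEq] at h
        obtain ⟨rfl, rfl⟩ := h
        simpa using Nat.lt_succ_of_lt (ih _ _ hrec)

-- ===== PORT A =====
-- A, pass 1: the tokenising while-loop (escape / '[' class / '{' repetition / single char)
def pvTokA : List Char → List (List Char)
  | [] => []
  | '\\' :: nc :: rest =>
    if nc ∈ pvEscChars then ['\\', nc] :: pvTokA rest
    else if nc ∈ pvPunctChars then [nc] :: pvTokA rest
    else ['\\', nc] :: pvTokA rest
  | c :: cs =>
    if c = '[' then
      match h : pvScanTo ']' cs with
      | some (b, r) => (c :: b ++ [']']) :: pvTokA r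
      | none => [c] :: pvTokA cs
    else if c = '{' then
      match h : pvScanTo '}' cs with
      | some (b, r) => (c :: b ++ ['}']) :: pvTokA r
      | none => [c] :: pvTokA cs
    else [c] :: pvTokA cs
  termination_by cs => cs.length
  decreasing_by
    all_goals simp_all
    · exact Nat.le_of_lt (pvScanTo_length _ _ _ _ h)
    · exact Nat.le_of_lt (pvScanTo_length _ _ _ _ h)

-- A, pass 2: the indexed for-loop over the token list, peeking at the next token
def pvJoinA : List (List Char) → List Char
  | [] => []
  | [t] => t
  | t :: u :: rest =>
    t ++ (if t ≠ ['('] ∧ t ∉ pvBinOps ∧ u ≠ [')'] ∧ u ∉ pvAllOps then ['.'] else [])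
      ++ pvJoinA (u :: rest)

def format_regex (regex : String) : String :=
  -- regex.replace(' ', '') is exact via PySem.Str.replace
  String.ofList (pvJoinA (pvTokA (PySem.Str.replace regex " " "").toList))

-- ===== PORT B =====
-- B's concatenation test against the previous token (the `prev is not None` branch)
def pvNeedDot (p t : List Char) : Bool :=
  decide (p ≠ ['('] ∧ p ∉ pvBinOps ∧ t ≠ [')'] ∧ t ∉ pvAllOps)

-- B: one fused loop; scans a token, immediately emits the optional concatenation operator plus the token,
-- carrying only the previous token
def pvRunB (prev : Option (List Char)) : List Char → List Char
  | [] => []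
  | '\\' :: nc :: rest =>
    let tok := if nc ∈ pvPunctChars then [nc] else ['\\', nc]
    (match prev with
     | some p => if pvNeedDot p tok then ['.'] else []
     | none => []) ++ tok ++ pvRunB (some tok) rest
  | c :: cs =>
    if c ∈ ['[', '{'] then
      let close := if c = '[' then ']' else '}'
      match h : pvScanTo close cs with
      | some (b, r) =>
        let tok := c :: b ++ [close]
        (match prev with
         | some p => if pvNeedDot p tok then ['.'] else []
         | none => []) ++ tok ++ pvRunB (some tok) r
      | none =>
        (match prev with
         | some p => if pvNeedDot p [c] then ['.'] else []
         | none => []) ++ [c] ++ pvRunB (some [c]) cs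
    else
      (match prev with
       | some p => if pvNeedDot p [c] then ['.'] else []
       | none => []) ++ [c] ++ pvRunB (some [c]) cs
  termination_by cs => cs.length
  decreasing_by
    all_goals simp_all
    exact Nat.le_of_lt (pvScanTo_length _ _ _ _ h)

def format_regex_alt (regex : String) : String :=
  String.ofList (pvRunB none (PySem.Str.replace regex " " "").toList)

-- ===== PRECONDITION & SPEC =====
def Spec_format_regex (regex : String) (out : String) : Prop := out = format_regex_alt regex
instance (regex : String) (out : String) : Decidable (Spec_format_regex regex out) := by unfold Spec_format_regex; infer_instance

-- ===== CLAIM (what is proved, stated in full; the proofs are below) =====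
def Claim_equal_format_regex : Prop := ∀ (regex : String), Dom_format_regex regex → Spec_format_regex regex (format_regex regex)

-- ===== LEMMAS AND PROOFS =====

-- what B emits for one token given the previous one
def pvEmitTok (prev : Option (List Char)) (t : List Char) : List Char :=
  match prev with
  | some p => if pvNeedDot p t then ['.'] else []
  | none => []

-- B's output described over A's token list
def pvEmitJoin (prev : Option (List Char)) : List (List Char) → List Char
  | [] => []
  | t :: ts => pvEmitTok prev t ++ t ++ pvEmitJoin (some t) ts

theorem pvEsc_not_punct (nc : Char) (h : nc ∈ pvEscChars) : nc ∉ pvPunctChars := by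
  fin_cases h <;> decide

theorem pvTokA_lbrack (cs b r : List Char) (h : pvScanTo ']' cs = some (b, r)) :
    pvTokA ('[' :: cs) = ('[' :: b ++ [']']) :: pvTokA r := by
  rw [pvTokA.eq_def]
  split
  · rename_i heq; simp at heq
  · rename_i heq; simp at heq
  · rename_i hnm heq
    injection heq with h1 h2
    subst h2
    subst h1
    rw [if_pos rfl]
    split
    · rename_i b' r' heq2
      rw [h] at heq2
      obtain ⟨rfl, rfl⟩ := by simpa using heq2.symm
      rfl
    · rename_i heq2
      rw [h] at heq2
      cases heq2

theorem pvTokA_lbrace (cs b r : List Char) (h : pvScanTo '}' cs = some (b, r)) :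
    pvTokA ('{' :: cs) = ('{' :: b ++ ['}']) :: pvTokA r := by
  rw [pvTokA.eq_def]
  split
  · rename_i heq; simp at heq
  · rename_i heq; simp at heq
  · rename_i hnm heq
    injection heq with h1 h2
    subst h2
    subst h1
    rw [if_neg (by decide), if_pos rfl]
    split
    · rename_i b' r' heq2
      rw [h] at heq2
      obtain ⟨rfl, rfl⟩ := by simpa using heq2.symm
      rfl
    · rename_i heq2
      rw [h] at heq2
      cases heq2

theorem pvTokA_lbrack_none (cs : List Char) (h : pvScanTo ']' cs = none) :
    pvTokA ('[' :: cs) = ['['] :: pvTokA cs := by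
  rw [pvTokA.eq_def]
  split
  · rename_i heq; simp at heq
  · rename_i heq; simp at heq
  · rename_i hnm heq
    injection heq with h1 h2
    subst h2
    subst h1
    rw [if_pos rfl]
    split
    · rename_i b' r' heq2
      rw [h] at heq2
      cases heq2
    · rfl

theorem pvTokA_lbrace_none (cs : List Char) (h : pvScanTo '}' cs = none) :
    pvTokA ('{' :: cs) = ['{'] :: pvTokA cs := by
  rw [pvTokA.eq_def]
  split
  · rename_i heq; simp at heq
  · rename_i heq; simp at heq
  · rename_i hnm heq
    injection heq with h1 h2
    subst h2
    subst h1
    rw [if_neg (by decide), if_pos rfl]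
    split
    · rename_i b' r' heq2
      rw [h] at heq2
      cases heq2
    · rfl

theorem pvRunB_eq_emitJoin (cs : List Char) (prev : Option (List Char)) :
    pvRunB prev cs = pvEmitJoin prev (pvTokA cs) := by
  fun_induction pvRunB prev cs with
  | case1 => simp [pvTokA, pvEmitJoin]
  | case2 prev nc rest tok ih =>
    by_cases hesc : nc ∈ pvEscChars
    · have hp := pvEsc_not_punct nc hesc
      simp_all [pvTokA, pvEmitJoin, pvEmitTok, tok]
    · by_cases hp : nc ∈ pvPunctChars <;>
        simp_all [pvTokA, pvEmitJoin, pvEmitTok, tok]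
  | case3 prev c cs hnm hmem close b r hscan tok ih =>
    have hc : c = '[' ∨ c = '{' := by simpa using hmem
    rcases hc with rfl | rfl
    · rw [pvTokA_lbrack cs b r (by simpa using hscan)]
      simp_all [pvEmitJoin, pvEmitTok, tok, close]
      cases prev <;> rfl
    · rw [pvTokA_lbrace cs b r (by simpa using hscan)]
      simp_all [pvEmitJoin, pvEmitTok, tok, close]
      cases prev <;> rfl
  | case4 prev c cs hnm hmem close hscan ih =>
    have hc : c = '[' ∨ c = '{' := by simpa using hmem
    rcases hc with rfl | rfl
    · rw [pvTokA_lbrack_none cs (by simpa using hscan)]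
      simp_all [pvEmitJoin, pvEmitTok, close]
    · rw [pvTokA_lbrace_none cs (by simpa using hscan)]
      simp_all [pvEmitJoin, pvEmitTok, close]
  | case5 prev c cs hnm hmem ih =>
    have hc1 : c ≠ '[' := by simp at hmem; exact hmem.1
    have hc2 : c ≠ '{' := by simp at hmem; exact hmem.2
    by_cases hbs : ∃ nc rest, c = '\\' ∧ cs = nc :: rest
    · obtain ⟨nc, rest, rfl, rfl⟩ := hbs
      exact (hnm nc rest rfl rfl).elim
    · rw [show pvTokA (c :: cs) = [c] :: pvTokA cs from by
        rw [pvTokA.eq_def]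
        split
        · rename_i heq; simp at heq
        · rename_i nc' rest' heq
          injection heq with h1 h2
          exact (hbs ⟨nc', rest', h1, h2⟩).elim
        · rename_i hnm' heq
          injection heq with h1 h2
          subst h2
          subst h1
          rw [if_neg hc1, if_neg hc2]]
      simp_all [pvEmitJoin, pvEmitTok]

theorem pvAux_join (ts : List (List Char)) :
    ∀ t, t ++ pvEmitJoin (some t) ts = pvJoinA (t :: ts) := by
  induction ts with
  | nil => intro t; simp [pvEmitJoin, pvJoinA]
  | cons u rest ih =>
    intro t
    simp only [pvEmitJoin, pvEmitTok, pvJoinA, pvNeedDot]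
    rw [← ih u]
    by_cases hc : (t ≠ ['('] ∧ t ∉ pvBinOps ∧ u ≠ [')'] ∧ u ∉ pvAllOps) <;> simp [hc]

theorem pvJoinA_eq_emitJoin (ts : List (List Char)) :
    pvEmitJoin none ts = pvJoinA ts := by
  cases ts with
  | nil => rfl
  | cons t rest => simpa [pvEmitJoin, pvEmitTok] using pvAux_join rest t

-- ===== VERDICT (by name: the statement is the Claim_ definition above) =====
theorem format_regex_spec : Claim_equal_format_regex := by
  intro regex _
  unfold Spec_format_regex format_regex format_regex_alt
  rw [pvRunB_eq_emitJoin, pvJoinA_eq_emitJoin]
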